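-- pv_equiv track=rewrite | github.com/Santhu-1912/Oracle-Cloud-AI-Multi-Agent-Testing-Automation-Platform | TestOps_AgentHub/tools/TDM_generator.py | _find_matching_template
-- ===== SOURCE A (Python) =====
-- def _find_matching_template(template_name: str, available_templates: list) -> str:
--     """Find matching template"""
--     template_lower = template_name.lower()
--
--     # Exact match
--     for template in available_templates:
--         if template.lower() == template_lower:
--             return template
--
--     # Partial match
--     for template in available_templates:
--         if template_lower in template.lower() or template.lower() in template_lower:
--             return template
--
--     return None
-- ===== SOURCE B (Python) =====
-- def _find_matching_template(template_name: str, available_templates: list) -> str: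
--     """Single pass: return an exact match immediately; remember the first partial match."""
--     template_lower = template_name.lower()
--     candidate = None
--     for template in available_templates:
--         t_lower = template.lower()
--         if t_lower == template_lower:
--             return template
--         if candidate is None and (template_lower in t_lower or t_lower in template_lower):
--             candidate = template
--     return candidate
-- ===== Notes on version B (the rewrite author's own statement) =====
-- stated objective: simpler
-- what changed: Replaced A's two separate scans (exact pass, then partial pass) with one scan that returns an exact match immediately and records only the first partial match as a fallback.
import Mathlib
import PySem

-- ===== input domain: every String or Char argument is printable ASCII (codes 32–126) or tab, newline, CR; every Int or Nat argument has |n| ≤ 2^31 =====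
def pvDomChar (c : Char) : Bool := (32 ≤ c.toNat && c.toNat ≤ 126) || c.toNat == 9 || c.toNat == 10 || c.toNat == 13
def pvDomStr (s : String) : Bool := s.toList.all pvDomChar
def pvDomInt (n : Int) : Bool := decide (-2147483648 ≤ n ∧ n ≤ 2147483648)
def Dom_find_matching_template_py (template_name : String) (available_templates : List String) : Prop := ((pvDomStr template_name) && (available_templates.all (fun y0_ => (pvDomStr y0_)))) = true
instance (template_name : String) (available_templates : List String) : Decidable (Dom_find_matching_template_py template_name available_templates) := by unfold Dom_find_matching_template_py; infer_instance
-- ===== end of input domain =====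

-- B changes the decomposition: one scan keeping a fallback candidate instead of A's two scans (simpler).

-- ===== PORT A =====
-- first loop of A: exact match
def pvExactLoop (template_lower : String) : List String → Option String
  | [] => none
  | template :: rest =>
    if PySem.Str.lower template = template_lower then some template
    else pvExactLoop template_lower rest

-- second loop of A: partial match
def pvPartialLoop (template_lower : String) : List String → Option String
  | [] => none
  | template :: rest =>
    if PySem.Str.isIn template_lower (PySem.Str.lower template)
        || PySem.Str.isIn (PySem.Str.lower template) template_lower then some template
    else pvPartialLoop template_lower rest

def find_matching_template_py (template_name : String) (available_templates : List String) : Option String :=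
  let template_lower := PySem.Str.lower template_name
  match pvExactLoop template_lower available_templates with
  | some t => some t
  | none =>
    match pvPartialLoop template_lower available_templates with
    | some t => some t
    | none => none

-- ===== PORT B =====
-- B's single loop: return exact immediately, record the first partial candidate
def pvAltLoop (template_lower : String) (candidate : Option String) : List String → Option String
  | [] => candidate
  | template :: rest =>
    let t_lower := PySem.Str.lower template
    if t_lower = template_lower then some template
    else
      pvAltLoop template_lower
        (if candidate.isNone
            && (PySem.Str.isIn template_lower t_lower || PySem.Str.isIn t_lower template_lower)
         then some template else candidate) rest

def find_matching_template_py_alt (template_name : String) (available_templates : List String) : Option String :=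
  pvAltLoop (PySem.Str.lower template_name) none available_templates

-- ===== PRECONDITION & SPEC =====
def Spec_find_matching_template_py (template_name : String) (available_templates : List String) (out : Option String) : Prop := out = find_matching_template_py_alt template_name available_templates
instance (template_name : String) (available_templates : List String) (out : Option String) : Decidable (Spec_find_matching_template_py template_name available_templates out) := by unfold Spec_find_matching_template_py; infer_instance

-- ===== CLAIM (what is proved, stated in full; the proofs are below) =====
def Claim_equal_find_matching_template_py : Prop := ∀ (template_name : String) (available_templates : List String), Dom_find_matching_template_py template_name available_templates → Spec_find_matching_template_py template_name available_templates (find_matching_template_py template_name available_templates)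

-- ===== LEMMAS AND PROOFS =====
-- Invariant of B's loop: it is A's exact loop, falling back to the carried candidate,
-- falling back to A's partial loop.
lemma pvAltLoop_eq (template_lower : String) (candidate : Option String)
    (ts : List String) :
    pvAltLoop template_lower candidate ts =
      match pvExactLoop template_lower ts with
      | some t => some t
      | none =>
        match candidate with
        | some c => some c
        | none => pvPartialLoop template_lower ts := by
  induction ts generalizing candidate with
  | nil => cases candidate <;> simp [pvAltLoop, pvExactLoop, pvPartialLoop]
  | cons t rest ih =>
    by_cases hx : PySem.Str.lower t = template_lower
    · simp [pvAltLoop, pvExactLoop, hx]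
    · cases candidate with
      | some c =>
        simp [pvAltLoop, pvExactLoop, hx, ih]
      | none =>
        simp [pvAltLoop, pvExactLoop, pvPartialLoop, hx, ih]
        cases pvExactLoop template_lower rest <;> split_ifs <;> simp

-- ===== VERDICT (by name: the statement is the Claim_ definition above) =====
theorem find_matching_template_py_spec : Claim_equal_find_matching_template_py := by
  intro template_name available_templates _
  unfold Spec_find_matching_template_py find_matching_template_py find_matching_template_py_alt
  rw [pvAltLoop_eq]
  cases hE : pvExactLoop (PySem.Str.lower template_name) available_templates <;>
    cases hP : pvPartialLoop (PySem.Str.lower template_name) available_templates <;>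
      simp [hE, hP]
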